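-- pv_equiv track=rewrite | github.com/llexuan/QEC-Move | src/simulate.py | merge_measure_reset_pairs
-- ===== SOURCE A (Python) =====
-- from typing import List, Tuple, Any
--
-- def merge_measure_reset_pairs(cir_mv: List[Tuple[str, Any]]) -> List[Tuple[str, Any]]:
--     """Merge measure+reset into Stim's MR only when adjacent.
--
--     The Qiskit exporter often emits a block of `measure` operations followed by a
--     block of `reset` operations. It's tempting to merge a `measure(q)` with a
--     later `reset(q)` while allowing operations on other qubits in between, but
--     Stim's DEM back-propagation can treat that as an actual demolition (MR)
--     collapse and can therefore raise "non-deterministic detectors/observables"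
--     errors for some circuits.
--
--     To keep the MR semantics consistent, we only merge when the sequence is
--     exactly:
--       ('measure', [q]) immediately followed by ('reset', [q]).
--     Otherwise we keep the original operations as separate `M` and `R`.
--     """
--     merged: List[Tuple[str, Any]] = []
--     i = 0
--     while i < len(cir_mv):
--         op, args = cir_mv[i]
--         if op == "measure" and len(args) == 1 and i + 1 < len(cir_mv):
--             q = args[0]
--             op2, args2 = cir_mv[i + 1]
--             if op2 == "reset" and args2 == [q]:
--                 merged.append(("mr", [q]))
--                 i += 2
--                 continue
--         merged.append((op, args))
--         i += 1
--     return merged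
-- ===== SOURCE B (Python) =====
-- from typing import List, Tuple, Any
--
-- def merge_measure_reset_pairs(cir_mv: List[Tuple[str, Any]]) -> List[Tuple[str, Any]]:
--     merged: List[Tuple[str, Any]] = []
--     pending = None  # (original op, original args, qubit) of a deferred single-qubit measure
--     for op, args in cir_mv:
--         if pending is not None:
--             pop, pargs, pq = pending
--             pending = None
--             if op == "reset" and args == [pq]:
--                 merged.append(("mr", [pq]))
--                 continue
--             merged.append((pop, pargs))
--         if op == "measure" and len(args) == 1:
--             pending = (op, args, args[0])
--         else:
--             merged.append((op, args))
--     if pending is not None: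
--         merged.append((pending[0], pending[1]))
--     return merged
-- ===== Notes on version B (the rewrite author's own statement) =====
-- stated objective: alternative
-- what changed: Replaces A's index-based while loop with lookahead (cir_mv[i+1], i += 2) by a single forward pass over the elements that defers each single-qubit measure in a 'pending' slot and merges it when the very next op is the matching reset, flushing the pending measure at the end.
import Mathlib
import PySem

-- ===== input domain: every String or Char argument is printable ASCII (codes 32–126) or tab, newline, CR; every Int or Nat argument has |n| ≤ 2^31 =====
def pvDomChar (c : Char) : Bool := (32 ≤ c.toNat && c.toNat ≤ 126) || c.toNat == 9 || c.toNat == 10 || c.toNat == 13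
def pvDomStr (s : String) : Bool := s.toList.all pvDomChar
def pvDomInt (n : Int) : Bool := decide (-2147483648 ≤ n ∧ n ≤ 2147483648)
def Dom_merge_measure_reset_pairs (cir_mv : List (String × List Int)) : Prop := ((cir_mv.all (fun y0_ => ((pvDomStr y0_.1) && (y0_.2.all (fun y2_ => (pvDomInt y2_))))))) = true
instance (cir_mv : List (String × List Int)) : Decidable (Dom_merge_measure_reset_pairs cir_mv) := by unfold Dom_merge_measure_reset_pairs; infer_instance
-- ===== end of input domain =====

-- B is an alternative single forward pass holding a deferred measure in a `pending` slot,
-- replacing A's index-based while loop with lookahead; return values are identical.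

-- ===== PORT A =====
-- A's while loop with index i and one-step lookahead, as the structural recursion on the
-- remaining suffix: the `i + 1 < len` test is the nonemptiness of the tail, cir_mv[i+1] its head.
def merge_measure_reset_pairs (cir_mv : List (String × List Int)) : List (String × List Int) :=
  match cir_mv with
  | [] => []
  | (op, args) :: [] => [(op, args)]   -- i + 1 < len fails: append (op, args), i += 1
  | (op, args) :: (op2, args2) :: rest =>
    if op = "measure" ∧ args.length = 1 ∧ op2 = "reset" ∧ args2 = [args.headD 0] then
      ("mr", [args.headD 0]) :: merge_measure_reset_pairs rest            -- i += 2, continue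
    else
      (op, args) :: merge_measure_reset_pairs ((op2, args2) :: rest)      -- i += 1

-- ===== PORT B =====
-- B's loop body, carrying the `pending` slot (original op, original args, qubit) as state.
def pvMergeGo (pending : Option (String × List Int × Int)) (l : List (String × List Int)) :
    List (String × List Int) :=
  match pending, l with
  | none, [] => []
  | some (pop, pargs, _), [] => [(pop, pargs)]               -- final flush of pending
  | none, (op, args) :: rest =>
    if op = "measure" ∧ args.length = 1 then
      pvMergeGo (some (op, args, args.headD 0)) rest         -- defer the measure
    else
      (op, args) :: pvMergeGo none rest
  | some (pop, pargs, pq), (op, args) :: rest =>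
    if op = "reset" ∧ args = [pq] then
      ("mr", [pq]) :: pvMergeGo none rest                    -- merge and continue
    else
      (pop, pargs) ::                                        -- emit deferred measure, fall through
        (if op = "measure" ∧ args.length = 1 then
          pvMergeGo (some (op, args, args.headD 0)) rest
        else
          (op, args) :: pvMergeGo none rest)

def merge_measure_reset_pairs_alt (cir_mv : List (String × List Int)) : List (String × List Int) :=
  pvMergeGo none cir_mv

-- ===== PRECONDITION & SPEC =====
def Spec_merge_measure_reset_pairs (cir_mv : List (String × List Int)) (out : List (String × List Int)) : Prop := out = merge_measure_reset_pairs_alt cir_mv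
instance (cir_mv : List (String × List Int)) (out : List (String × List Int)) : Decidable (Spec_merge_measure_reset_pairs cir_mv out) := by unfold Spec_merge_measure_reset_pairs; infer_instance

-- ===== CLAIM (what is proved, stated in full; the proofs are below) =====
def Claim_equal_merge_measure_reset_pairs : Prop := ∀ (cir_mv : List (String × List Int)), Dom_merge_measure_reset_pairs cir_mv → Spec_merge_measure_reset_pairs cir_mv (merge_measure_reset_pairs cir_mv)

-- ===== LEMMAS AND PROOFS =====

-- Invariant: with no pending, B's loop computes A's result on the suffix; with a pending
-- single-qubit measure, it computes A's result on the suffix with that measure prepended.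
theorem pvMergeGo_eq (l : List (String × List Int)) :
    pvMergeGo none l = merge_measure_reset_pairs l ∧
    (∀ pargs : List Int, pargs.length = 1 →
      pvMergeGo (some ("measure", pargs, pargs.headD 0)) l =
        merge_measure_reset_pairs (("measure", pargs) :: l)) := by
  induction l with
  | nil =>
    constructor
    · simp [pvMergeGo, merge_measure_reset_pairs]
    · intro pargs _
      simp [pvMergeGo, merge_measure_reset_pairs]
  | cons hd rest ih =>
    obtain ⟨op, args⟩ := hd
    have hnone : pvMergeGo none ((op, args) :: rest) =
        merge_measure_reset_pairs ((op, args) :: rest) := by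
      by_cases hm : op = "measure" ∧ args.length = 1
      · rw [pvMergeGo, if_pos hm]
        obtain ⟨h1, h2⟩ := hm
        subst h1
        exact ih.2 args h2
      · cases rest with
        | nil => simp [pvMergeGo, merge_measure_reset_pairs, hm]
        | cons hd2 rest2 =>
          obtain ⟨op2, args2⟩ := hd2
          rw [pvMergeGo, if_neg hm, merge_measure_reset_pairs,
            if_neg (by tauto), ih.1]
    refine ⟨hnone, ?_⟩
    intro pargs hlen
    by_cases hr : op = "reset" ∧ args = [pargs.headD 0]
    · rw [pvMergeGo, if_pos hr, merge_measure_reset_pairs,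
        if_pos ⟨rfl, hlen, hr⟩, ih.1]
    · have : merge_measure_reset_pairs (("measure", pargs) :: (op, args) :: rest) =
          ("measure", pargs) :: merge_measure_reset_pairs ((op, args) :: rest) := by
        rw [merge_measure_reset_pairs, if_neg (by tauto)]
      rw [this, ← hnone]
      conv_lhs => rw [pvMergeGo]
      rw [if_neg hr]
      conv_rhs => rw [pvMergeGo]

-- ===== VERDICT (by name: the statement is the Claim_ definition above) =====
theorem merge_measure_reset_pairs_spec : Claim_equal_merge_measure_reset_pairs := by
  intro cir_mv _
  unfold Spec_merge_measure_reset_pairs merge_measure_reset_pairs_alt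
  exact ((pvMergeGo_eq cir_mv).1).symm
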